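-- pv_equiv track=rewrite | github.com/chidambaram27/migration-agent | agent/tools/docker_tools.py | is_multi_stage_dockerfile
-- ===== SOURCE A (Python) =====
-- def is_multi_stage_dockerfile(dockerfile_content: str) -> bool:
--     """Check if a Dockerfile is already multi-stage by counting FROM statements.
--
--     Args:
--         dockerfile_content: Content of the Dockerfile
--
--     Returns:
--         True if Dockerfile has multiple FROM statements (multi-stage), False otherwise
--     """
--     # Count FROM statements (case-insensitive, ignoring comments)
--     lines = dockerfile_content.split('\n')
--     from_count = 0
--
--     for line in lines:
--         # Strip whitespace and check if line starts with FROM (ignoring comments)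
--         stripped = line.strip()
--         if stripped and not stripped.startswith('#'):
--             if stripped.upper().startswith('FROM'):
--                 from_count += 1
--
--     return from_count > 1
-- ===== SOURCE B (Python) =====
-- def is_multi_stage_dockerfile(dockerfile_content: str) -> bool:
--     """Single character-level scan: at each line start skip horizontal whitespace,
--     test the next 4 chars case-insensitively for 'from', then jump to the next
--     newline; stops early once a second match is found."""
--     s = dockerfile_content
--     n = len(s)
--     count = 0
--     i = 0
--     while i < n:
--         # skip leading whitespace of the line (never the newline itself)
--         while i < n and s[i] != '\n' and s[i].isspace():
--             i += 1
--         if s[i:i+4].lower() == 'from':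
--             count += 1
--             if count > 1:
--                 return True
--         # jump to the end of the line
--         while i < n and s[i] != '\n':
--             i += 1
--         i += 1
--     return count > 1
-- ===== Notes on version B (the rewrite author's own statement) =====
-- stated objective: alternative
-- what changed: Replaced A's split-into-lines-then-per-line strip/upper/startswith pipeline by a single character-level scan that skips a line's leading whitespace, compares the next four characters case-insensitively with the FROM keyword, jumps to the next line start, and returns early once a second match is found.
import Mathlib
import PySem

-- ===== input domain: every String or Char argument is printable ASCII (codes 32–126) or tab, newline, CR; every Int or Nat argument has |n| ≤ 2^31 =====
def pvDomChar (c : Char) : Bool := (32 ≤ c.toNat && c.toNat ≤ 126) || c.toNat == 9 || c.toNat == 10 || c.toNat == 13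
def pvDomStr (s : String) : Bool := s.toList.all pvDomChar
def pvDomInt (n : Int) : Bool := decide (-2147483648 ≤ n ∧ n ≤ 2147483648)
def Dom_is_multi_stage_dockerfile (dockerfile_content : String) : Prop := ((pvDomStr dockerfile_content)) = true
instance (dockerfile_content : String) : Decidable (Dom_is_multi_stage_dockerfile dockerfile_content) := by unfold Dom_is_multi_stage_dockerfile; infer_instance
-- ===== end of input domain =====

-- B replaces A's split-into-lines loop by a single character-level scan with an
-- early exit after the second FROM match; same return value, no speed claim made.

-- ===== PORT A =====
-- literal port of A: split on '\n', per line strip/'#'-check/upper-prefix check, count, compare with 1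
def is_multi_stage_dockerfile (dockerfile_content : String) : Bool :=
  let lines := PySem.Chars.splitOn dockerfile_content.toList ['\n']
  let from_count : Int := lines.foldl (fun from_count line =>
    let stripped := PySem.Chars.strip line
    if !stripped.isEmpty && !(PySem.Chars.startswith stripped ['#']) then
      if PySem.Chars.startswith (PySem.Chars.upper stripped) ['F', 'R', 'O', 'M'] then
        from_count + 1
      else from_count
    else from_count) 0
  decide (from_count > 1)

-- ===== PORT B =====
-- Source B's whitespace test `s[i] != '\n' and s[i].isspace()`
def pvWsNoNl (c : Char) : Bool := (c != '\n') && PySem.Chars.isspace c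

-- Source B's while-loop; the position i is represented by the remaining character list,
-- so the slice s[i:i+4] is `take 4` of the remainder (exact: slices clamp at the end)
def pvScan : List Char → Int → Bool
  | [], count => decide (count > 1)
  | c :: rest, count =>
    let cs := List.dropWhile pvWsNoNl (c :: rest)
    if PySem.Chars.lower (cs.take 4) == ['f', 'r', 'o', 'm'] then
      if count + 1 > 1 then true
      else pvScan (List.tail (List.dropWhile (fun x => x != '\n') cs)) (count + 1)
    else pvScan (List.tail (List.dropWhile (fun x => x != '\n') cs)) count
termination_by cs _ => cs.length
decreasing_by
  all_goals
    simp only [List.length_tail]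
    have h1 := List.length_dropWhile_le pvWsNoNl (c :: rest)
    have h2 := List.length_dropWhile_le (fun x => x != '\n') (List.dropWhile pvWsNoNl (c :: rest))
    simp only [List.length_cons] at *
    omega

def is_multi_stage_dockerfile_alt (dockerfile_content : String) : Bool :=
  pvScan dockerfile_content.toList 0

-- ===== PRECONDITION & SPEC =====
def Spec_is_multi_stage_dockerfile (dockerfile_content : String) (out : Bool) : Prop := out = is_multi_stage_dockerfile_alt dockerfile_content
instance (dockerfile_content : String) (out : Bool) : Decidable (Spec_is_multi_stage_dockerfile dockerfile_content out) := by unfold Spec_is_multi_stage_dockerfile; infer_instance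

-- ===== CLAIM (what is proved, stated in full; the proofs are below) =====
def Claim_equal_is_multi_stage_dockerfile : Prop := ∀ (dockerfile_content : String), Dom_is_multi_stage_dockerfile dockerfile_content → Spec_is_multi_stage_dockerfile dockerfile_content (is_multi_stage_dockerfile dockerfile_content)

-- ===== LEMMAS AND PROOFS =====

-- Char arithmetic: upperChar c = U iff lowerChar c = L for a letter pair (U, L)
theorem pvChEq (c d : Char) (h : c.toNat = d.toNat) : c = d := by
  apply Char.ext; exact UInt32.toNat_inj.mp h

theorem pvChLe (c d : Char) : (c ≤ d) ↔ c.toNat ≤ d.toNat := by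
  rw [Char.le_def]; exact UInt32.le_iff_toNat_le

theorem pvUpChar (c u l : Char) (hu : u.toNat + 32 = l.toNat) (h65 : 65 ≤ u.toNat) (h90 : u.toNat ≤ 90) :
    (PySem.Chars.upperChar c = u) ↔ (c = u ∨ c = l) := by
  unfold PySem.Chars.upperChar PySem.Chars.islower
  split_ifs with h
  · simp only [Bool.and_eq_true, decide_eq_true_eq, pvChLe] at h
    have hac : ('a' : Char).toNat = 97 := by decide
    have hzc : ('z' : Char).toNat = 122 := by decide
    rw [hac] at h; rw [hzc] at h
    have hval : (c.toNat - 32).isValidChar := by left; omega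
    constructor
    · intro he
      have := congrArg Char.toNat he
      rw [Char.toNat_ofNat, if_pos hval] at this
      right; apply pvChEq; omega
    · rintro (rfl | rfl)
      · omega
      · apply pvChEq; rw [Char.toNat_ofNat, if_pos hval]; omega
  · simp only [Bool.and_eq_true, decide_eq_true_eq, pvChLe, not_and, not_le] at h
    have hac : ('a' : Char).toNat = 97 := by decide
    have hzc : ('z' : Char).toNat = 122 := by decide
    rw [hac] at h; rw [hzc] at h
    constructor
    · intro he; left; exact he
    · rintro (rfl | rfl)
      · rfl
      · omega

theorem pvLowChar (c u l : Char) (hu : u.toNat + 32 = l.toNat) (h65 : 65 ≤ u.toNat) (h90 : u.toNat ≤ 90) :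
    (PySem.Chars.lowerChar c = l) ↔ (c = u ∨ c = l) := by
  unfold PySem.Chars.lowerChar PySem.Chars.isupper
  split_ifs with h
  · simp only [Bool.and_eq_true, decide_eq_true_eq, pvChLe] at h
    have hac : ('A' : Char).toNat = 65 := by decide
    have hzc : ('Z' : Char).toNat = 90 := by decide
    rw [hac] at h; rw [hzc] at h
    have hval : (c.toNat + 32).isValidChar := by left; omega
    constructor
    · intro he
      have := congrArg Char.toNat he
      rw [Char.toNat_ofNat, if_pos hval] at this
      left; apply pvChEq; omega
    · rintro (rfl | rfl)
      · apply pvChEq; rw [Char.toNat_ofNat, if_pos hval]; omega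
      · omega
  · simp only [Bool.and_eq_true, decide_eq_true_eq, pvChLe, not_and, not_le] at h
    have hac : ('A' : Char).toNat = 65 := by decide
    have hzc : ('Z' : Char).toNat = 90 := by decide
    rw [hac] at h; rw [hzc] at h
    constructor
    · intro he; right; exact he
    · rintro (rfl | rfl)
      · omega
      · rfl

-- the common spec: split at newlines (Python split('\n') keeps empty pieces)
def nlSplit (cs : List Char) : List (List Char) :=
  match _h : List.dropWhile (fun x => x != '\n') cs with
  | [] => [List.takeWhile (fun x => x != '\n') cs]
  | _ :: rest => List.takeWhile (fun x => x != '\n') cs :: nlSplit rest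
termination_by cs.length
decreasing_by
  have h1 := List.length_dropWhile_le (fun x => x != '\n') cs
  rw [_h] at h1
  simp only [List.length_cons] at h1
  omega

-- the 4-char case-insensitive prefix test on an lstripped line
def checkFrom : List Char → Bool
  | a :: b :: c :: d :: _ =>
    (PySem.Chars.lowerChar a == 'f') && (PySem.Chars.lowerChar b == 'r') &&
    (PySem.Chars.lowerChar c == 'o') && (PySem.Chars.lowerChar d == 'm')
  | _ => false

def predLine (l : List Char) : Bool := checkFrom (List.dropWhile PySem.Chars.isspace l)

-- A's per-line condition as one boolean
def condA (l : List Char) : Bool :=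
  (!(PySem.Chars.strip l).isEmpty && !(PySem.Chars.startswith (PySem.Chars.strip l) ['#'])) &&
  PySem.Chars.startswith (PySem.Chars.upper (PySem.Chars.strip l)) ['F', 'R', 'O', 'M']

def consHead (p : List Char) : List (List Char) → List (List Char)
  | [] => [p]
  | x :: xs => (p ++ x) :: xs

theorem nlSplit_shape (cs : List Char) :
    ∃ t, nlSplit cs = List.takeWhile (fun x => x != '\n') cs :: t := by
  unfold nlSplit; split <;> exact ⟨_, rfl⟩

theorem nlSplit_eq_nil (cs : List Char) (h : List.dropWhile (fun x => x != '\n') cs = []) :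
    nlSplit cs = [List.takeWhile (fun x => x != '\n') cs] := by
  rw [nlSplit]
  split
  · rfl
  · rename_i x xs h2; rw [h] at h2; cases h2

theorem nlSplit_eq_cons (cs : List Char) (y : Char) (r2 : List Char)
    (h : List.dropWhile (fun x => x != '\n') cs = y :: r2) :
    nlSplit cs = List.takeWhile (fun x => x != '\n') cs :: nlSplit r2 := by
  rw [nlSplit]
  split
  · rename_i h2; rw [h] at h2; cases h2
  · rename_i x xs h2; rw [h] at h2; injection h2 with h1 h3; subst h3; rfl

theorem nlSplit_nil : nlSplit [] = [[]] := nlSplit_eq_nil [] rfl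

theorem nlSplit_newline (rest : List Char) : nlSplit ('\n' :: rest) = [] :: nlSplit rest := by
  rw [nlSplit_eq_cons ('\n' :: rest) '\n' rest (by simp)]
  simp

theorem consHead_append (p q : List Char) (L : List (List Char)) :
    consHead (p ++ q) L = consHead p (consHead q L) := by
  cases L <;> simp [consHead]

theorem nlSplit_cons_ne (c : Char) (rest : List Char) (hc : c ≠ '\n') :
    nlSplit (c :: rest) = consHead [c] (nlSplit rest) := by
  have hstep : List.dropWhile (fun x => x != '\n') (c :: rest) = List.dropWhile (fun x => x != '\n') rest := by
    simp [bne_iff_ne, hc]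
  have htw : List.takeWhile (fun x => x != '\n') (c :: rest) = c :: List.takeWhile (fun x => x != '\n') rest := by
    simp [bne_iff_ne, hc]
  cases h : List.dropWhile (fun x => x != '\n') rest with
  | nil =>
    rw [nlSplit_eq_nil (c :: rest) (hstep.trans h), nlSplit_eq_nil rest h, htw]
    rfl
  | cons y r2 =>
    rw [nlSplit_eq_cons (c :: rest) y r2 (hstep.trans h), nlSplit_eq_cons rest y r2 h, htw]
    rfl

theorem pvGoGen (fuel : Nat) (l cur : List Char) (acc : List (List Char)) (h : l.length ≤ fuel) :
    PySem.Chars.splitOn.go ['\n'] fuel l cur acc = acc.reverse ++ consHead cur.reverse (nlSplit l) := by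
  induction fuel generalizing l cur acc with
  | zero =>
    have hl : l = [] := List.eq_nil_of_length_eq_zero (by omega)
    subst hl
    rw [PySem.Chars.splitOn.go, nlSplit_nil]
    simp [consHead]
  | succ fuel ih =>
    cases l with
    | nil =>
      rw [PySem.Chars.splitOn.go]
      · rw [nlSplit_nil]; simp [consHead]
      · simp
    | cons c rest =>
      rw [PySem.Chars.splitOn.go]
      by_cases hc : c = '\n'
      · subst hc
        have hpre : (['\n'] : List Char).isPrefixOf ('\n' :: rest) = true := by
          simp [List.isPrefixOf]
        rw [if_pos hpre]
        simp only [List.length_cons] at h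
        rw [show List.drop (['\n'] : List Char).length ('\n' :: rest) = rest by simp]
        rw [ih rest [] (cur.reverse :: acc) (by omega)]
        rw [nlSplit_newline]
        obtain ⟨t, ht⟩ := nlSplit_shape rest
        rw [ht]
        simp [consHead]
      · have hpre : (['\n'] : List Char).isPrefixOf (c :: rest) = false := by
          simp [List.isPrefixOf]
          exact fun he => absurd he.symm hc
        rw [if_neg (by simp [hpre])]
        simp only [List.length_cons] at h
        rw [ih rest (c :: cur) acc (by omega)]
        rw [nlSplit_cons_ne c rest hc]
        rw [show (c :: cur).reverse = cur.reverse ++ [c] by simp]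
        rw [consHead_append]

theorem pvSplitOn_nl (cs : List Char) : PySem.Chars.splitOn cs ['\n'] = nlSplit cs := by
  unfold PySem.Chars.splitOn
  rw [pvGoGen _ _ _ _ (by omega)]
  obtain ⟨t, ht⟩ := nlSplit_shape cs
  rw [ht]; simp [consHead]

-- rstrip decomposition and prefix transfer
theorem pvRstrip_decomp (l : List Char) :
    PySem.Chars.rstrip l ++ (List.takeWhile PySem.Chars.isspace l.reverse).reverse = l := by
  unfold PySem.Chars.rstrip
  rw [← List.reverse_append, List.takeWhile_append_dropWhile, List.reverse_reverse]

theorem pvPrefix_rstrip (p l : List Char) (hp : ∀ c ∈ p, PySem.Chars.isspace c = false) :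
    p <+: PySem.Chars.rstrip l ↔ p <+: l := by
  constructor
  · intro h
    exact h.trans ⟨(List.takeWhile PySem.Chars.isspace l.reverse).reverse, pvRstrip_decomp l⟩
  · intro h
    have hr : PySem.Chars.rstrip l <+: l := ⟨_, pvRstrip_decomp l⟩
    rcases List.prefix_or_prefix_of_prefix h hr with h2 | h2
    · exact h2
    · obtain ⟨t, ht⟩ := h2
      cases t with
      | nil => simp at ht; exact ht ▸ List.prefix_refl _
      | cons x xs =>
        exfalso
        have hxp : x ∈ p := by rw [← ht]; simp
        have hsp := hp x hxp
        have hpre : x :: xs <+: (List.takeWhile PySem.Chars.isspace l.reverse).reverse := by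
          rw [← List.prefix_append_right_inj (PySem.Chars.rstrip l), ht, pvRstrip_decomp l]
          exact h
        obtain ⟨u, hu⟩ := hpre
        have hxmem : x ∈ List.takeWhile PySem.Chars.isspace l.reverse := by
          rw [← List.mem_reverse, ← hu]; simp
        have := List.mem_takeWhile_imp hxmem
        rw [hsp] at this; exact Bool.false_ne_true this

theorem pvIsspace_false_of (c : Char) (h1 : 65 ≤ c.toNat) (h2 : c.toNat ≤ 122) :
    PySem.Chars.isspace c = false := by
  unfold PySem.Chars.isspace
  simp only [Bool.or_eq_false_iff, Bool.and_eq_false_iff, decide_eq_false_iff_not]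
  omega

theorem pvIsspace_upper (c : Char) :
    PySem.Chars.isspace (PySem.Chars.upperChar c) = PySem.Chars.isspace c := by
  unfold PySem.Chars.upperChar PySem.Chars.islower
  split_ifs with h
  · simp only [Bool.and_eq_true, decide_eq_true_eq, pvChLe] at h
    have hac : ('a' : Char).toNat = 97 := by decide
    have hzc : ('z' : Char).toNat = 122 := by decide
    rw [hac] at h; rw [hzc] at h
    have hval : (c.toNat - 32).isValidChar := by left; omega
    have ht : (Char.ofNat (c.toNat - 32)).toNat = c.toNat - 32 := by
      rw [Char.toNat_ofNat, if_pos hval]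
    rw [pvIsspace_false_of _ (by omega) (by omega), pvIsspace_false_of c (by omega) (by omega)]
  · rfl

-- upper commutes with rstrip
theorem pvUpper_rstrip (l : List Char) :
    PySem.Chars.upper (PySem.Chars.rstrip l) = PySem.Chars.rstrip (PySem.Chars.upper l) := by
  unfold PySem.Chars.upper PySem.Chars.rstrip
  rw [← List.map_reverse, List.dropWhile_map, List.map_reverse]
  have : (PySem.Chars.isspace ∘ PySem.Chars.upperChar) = PySem.Chars.isspace := by
    funext c; exact pvIsspace_upper c
  rw [this]

theorem pvFrom_nonspace : ∀ c ∈ (['F', 'R', 'O', 'M'] : List Char), PySem.Chars.isspace c = false := by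
  intro c hc; fin_cases hc <;> rfl

-- the FROM-prefix test on the uppercased list is checkFrom
theorem pvUpLow (c u l : Char) (hu : u.toNat + 32 = l.toNat) (h65 : 65 ≤ u.toNat) (h90 : u.toNat ≤ 90) :
    (PySem.Chars.upperChar c = u) ↔ (PySem.Chars.lowerChar c = l) :=
  (pvUpChar c u l hu h65 h90).trans (pvLowChar c u l hu h65 h90).symm

theorem pvKey2 (ls : List Char) :
    (['F', 'R', 'O', 'M'] <+: PySem.Chars.upper ls) ↔ checkFrom ls = true := by
  match ls with
  | [] => simp [PySem.Chars.upper, checkFrom]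
  | [a] => simp [PySem.Chars.upper, checkFrom, List.cons_prefix_cons]
  | [a, b] => simp [PySem.Chars.upper, checkFrom, List.cons_prefix_cons]
  | [a, b, c] => simp [PySem.Chars.upper, checkFrom, List.cons_prefix_cons]
  | a :: b :: c :: d :: t =>
    simp only [PySem.Chars.upper, List.map_cons, List.cons_prefix_cons, List.nil_prefix, and_true,
      checkFrom, Bool.and_eq_true, beq_iff_eq]
    rw [eq_comm.trans (pvUpLow a 'F' 'f' (by decide) (by decide) (by decide)),
      eq_comm.trans (pvUpLow b 'R' 'r' (by decide) (by decide) (by decide)),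
      eq_comm.trans (pvUpLow c 'O' 'o' (by decide) (by decide) (by decide)),
      eq_comm.trans (pvUpLow d 'M' 'm' (by decide) (by decide) (by decide))]
    tauto

-- A's condition equals the common per-line predicate
theorem pvCondA_eq (l : List Char) : condA l = predLine l := by
  have hstrip : PySem.Chars.strip l = PySem.Chars.rstrip (List.dropWhile PySem.Chars.isspace l) := rfl
  have hpred : predLine l = checkFrom (List.dropWhile PySem.Chars.isspace l) := rfl
  have hiff : (['F', 'R', 'O', 'M'] <+: PySem.Chars.upper (PySem.Chars.strip l)) ↔
      checkFrom (List.dropWhile PySem.Chars.isspace l) = true := by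
    rw [hstrip, pvUpper_rstrip, pvPrefix_rstrip _ _ pvFrom_nonspace, pvKey2]
  rw [Bool.eq_iff_iff, hpred]
  constructor
  · intro hc
    unfold condA at hc
    simp only [Bool.and_eq_true] at hc
    rw [← PySem.Chars.startswith_iff, hc.2] at hiff
    exact hiff.mp rfl
  · intro hc
    have hpre := hiff.mpr hc
    unfold condA
    simp only [Bool.and_eq_true]
    obtain ⟨u, hu⟩ := hpre
    refine ⟨⟨?_, ?_⟩, ?_⟩
    · -- strip l nonempty
      rw [Bool.not_eq_eq_eq_not, Bool.not_true, List.isEmpty_eq_false_iff]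
      intro he
      rw [show PySem.Chars.upper (PySem.Chars.strip l) = [] by rw [he]; rfl] at hu
      cases hu
    · -- does not start with '#'
      rw [Bool.not_eq_eq_eq_not, Bool.not_true]
      cases hst : PySem.Chars.strip l with
      | nil => simp [PySem.Chars.startswith, List.isPrefixOf]
      | cons x xs =>
        rw [hst] at hu
        have hcons : PySem.Chars.upper (x :: xs) = PySem.Chars.upperChar x :: PySem.Chars.upper xs := rfl
        rw [hcons] at hu
        have hx : 'F' = PySem.Chars.upperChar x := by
          have := congrArg List.headI hu
          simpa using this
        by_contra hsw
        rw [Bool.not_eq_false] at hsw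
        have hsw2 := (PySem.Chars.startswith_iff _ _).mp hsw
        obtain ⟨v, hv⟩ := hsw2
        have hx2 : x = '#' := by
          have := congrArg List.headI hv
          simpa using this.symm
        rw [hx2] at hx
        exact absurd hx.symm (by decide)
    · rw [PySem.Chars.startswith_iff]
      exact ⟨u, hu⟩

-- whitespace skipping inside a newline-free list
theorem pvDropWs_noNl (l : List Char) (h : ∀ x ∈ l, x ≠ '\n') :
    List.dropWhile pvWsNoNl l = List.dropWhile PySem.Chars.isspace l := by
  induction l with
  | nil => rfl
  | cons a t ih =>
    have ha : a ≠ '\n' := h a (by simp)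
    have : pvWsNoNl a = PySem.Chars.isspace a := by
      unfold pvWsNoNl; simp [bne_iff_ne, ha]
    simp only [List.dropWhile_cons, this]
    split <;> [exact ih fun x hx => h x (by simp [hx]); rfl]

-- the 4-char slice test across the rest of the input equals checkFrom of the line
theorem pvFromTake (ls R : List Char) (hR : R = [] ∨ ∃ r, R = '\n' :: r) :
    (PySem.Chars.lower ((ls ++ R).take 4) == ['f', 'r', 'o', 'm']) = checkFrom ls := by
  have hnl : PySem.Chars.lowerChar '\n' = '\n' := rfl
  rcases hR with h0 | ⟨r, h0⟩ <;> subst h0 <;>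
    match ls with
    | [] => simp [PySem.Chars.lower, checkFrom, hnl]
    | [a] => simp [PySem.Chars.lower, checkFrom, hnl]
    | [a, b] => simp [PySem.Chars.lower, checkFrom, hnl]
    | [a, b, c] => simp [PySem.Chars.lower, checkFrom, hnl]
    | a :: b :: c :: d :: t =>
      simp only [PySem.Chars.lower, List.take_succ_cons, List.cons_append, List.take_zero,
        List.map_cons, List.map_nil, List.cons_beq_cons, checkFrom]
      cases PySem.Chars.lowerChar a == 'f' <;> cases PySem.Chars.lowerChar b == 'r' <;>
        cases PySem.Chars.lowerChar c == 'o' <;> cases PySem.Chars.lowerChar d == 'm' <;> rfl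

-- the main loop invariant of B
theorem pvDropWhile_head_false {α : Type} (p : α → Bool) (l : List α) (y : α) (r : List α)
    (h : List.dropWhile p l = y :: r) : p y = false := by
  induction l with
  | nil => cases h
  | cons a t ih =>
    rw [List.dropWhile_cons] at h
    by_cases hp : p a = true
    · rw [if_pos hp] at h; exact ih h
    · rw [if_neg hp] at h
      injection h with h1 _
      rw [← h1]
      exact Bool.eq_false_iff.mpr hp

theorem pvScan_eq (cs : List Char) (count : Int) :
    pvScan cs count = decide (1 < count + (List.countP predLine (nlSplit cs) : Int)) := by
  cases cs with
  | nil =>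
    rw [nlSplit_nil]
    have hp : predLine [] = false := rfl
    simp [pvScan, hp]
  | cons c rest =>
    have hsplit : List.takeWhile (fun x => x != '\n') (c :: rest) ++
        List.dropWhile (fun x => x != '\n') (c :: rest) = c :: rest := List.takeWhile_append_dropWhile
    have hlineNoNl : ∀ x ∈ List.takeWhile (fun x => x != '\n') (c :: rest), x ≠ '\n' := by
      intro x hx
      have := List.mem_takeWhile_imp hx
      simpa [bne_iff_ne] using this
    have hR : List.dropWhile (fun x => x != '\n') (c :: rest) = [] ∨
        ∃ r, List.dropWhile (fun x => x != '\n') (c :: rest) = '\n' :: r := by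
      cases hcase : List.dropWhile (fun x => x != '\n') (c :: rest) with
      | nil => exact Or.inl rfl
      | cons y r =>
        right
        refine ⟨r, ?_⟩
        have hy := pvDropWhile_head_false (fun x => x != '\n') (c :: rest) y r hcase
        simp only [bne_eq_false_iff_eq] at hy
        subst hy
        rfl
    have hls : List.dropWhile pvWsNoNl (c :: rest) =
        List.dropWhile PySem.Chars.isspace (List.takeWhile (fun x => x != '\n') (c :: rest)) ++
          List.dropWhile (fun x => x != '\n') (c :: rest) := by
      conv_lhs => rw [← hsplit]
      rw [List.dropWhile_append, pvDropWs_noNl _ hlineNoNl]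
      split_ifs with hE
      · rw [List.isEmpty_iff] at hE
        rw [hE, List.nil_append]
        rcases hR with h0 | ⟨r, h0⟩ <;> rw [h0]
        · rfl
        · rw [List.dropWhile_cons]
          simp [pvWsNoNl]
      · rfl
    have hlsNoNl : ∀ x ∈ List.dropWhile PySem.Chars.isspace
        (List.takeWhile (fun x => x != '\n') (c :: rest)), (x != '\n') = true := by
      intro x hx
      have := hlineNoNl x ((List.dropWhile_sublist _).subset hx)
      simpa [bne_iff_ne] using this
    have hdrop2 : List.dropWhile (fun x => x != '\n') (List.dropWhile pvWsNoNl (c :: rest)) =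
        List.dropWhile (fun x => x != '\n') (c :: rest) := by
      rw [hls, List.dropWhile_append, if_pos (by
        rw [List.isEmpty_iff]
        exact List.dropWhile_eq_nil_iff.mpr hlsNoNl)]
      rcases hR with h0 | ⟨r, h0⟩ <;> rw [h0]
      · rfl
      · rw [List.dropWhile_cons]
        simp
    have hfrom : (PySem.Chars.lower ((List.dropWhile pvWsNoNl (c :: rest)).take 4) ==
        ['f', 'r', 'o', 'm']) = checkFrom (List.dropWhile PySem.Chars.isspace
          (List.takeWhile (fun x => x != '\n') (c :: rest))) := by
      rw [hls]
      exact pvFromTake _ _ hR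
    have hpl : predLine (List.takeWhile (fun x => x != '\n') (c :: rest)) =
        checkFrom (List.dropWhile PySem.Chars.isspace
          (List.takeWhile (fun x => x != '\n') (c :: rest))) := rfl
    rw [pvScan]
    simp only [hfrom, hdrop2]
    rcases hR with h0 | ⟨r, h0⟩
    · rw [nlSplit_eq_nil _ h0, h0]
      by_cases hp : checkFrom (List.dropWhile PySem.Chars.isspace
          (List.takeWhile (fun x => x != '\n') (c :: rest))) = true
      · rw [if_pos hp]
        have : List.countP predLine [List.takeWhile (fun x => x != '\n') (c :: rest)] = 1 := by
          simp [hpl, hp]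
        rw [this]
        split_ifs with h1
        · rw [eq_comm, decide_eq_true_eq]
          push_cast
          omega
        · rw [List.tail_nil, pvScan.eq_1]
          simp only [decide_eq_decide]
          omega
      · rw [if_neg hp]
        have : List.countP predLine [List.takeWhile (fun x => x != '\n') (c :: rest)] = 0 := by
          simp only [List.countP_cons, hpl]
          simp [Bool.eq_false_iff.mpr, hp]
        rw [this, List.tail_nil, pvScan.eq_1]
        simp only [decide_eq_decide]
        omega
    · have hlen : r.length < rest.length + 1 := by
        have h1 := List.length_dropWhile_le (fun x => x != '\n') (c :: rest)
        rw [h0] at h1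
        simp only [List.length_cons] at h1
        omega
      rw [nlSplit_eq_cons _ '\n' r h0, h0]
      simp only [List.tail_cons]
      by_cases hp : checkFrom (List.dropWhile PySem.Chars.isspace
          (List.takeWhile (fun x => x != '\n') (c :: rest))) = true
      · rw [if_pos hp]
        have hcnt : List.countP predLine (List.takeWhile (fun x => x != '\n') (c :: rest) ::
            nlSplit r) = List.countP predLine (nlSplit r) + 1 := by
          simp [hpl, hp]
        rw [hcnt]
        split_ifs with h1
        · rw [eq_comm, decide_eq_true_eq]
          have := Int.natCast_nonneg (List.countP predLine (nlSplit r))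
          push_cast
          omega
        · rw [pvScan_eq r (count + 1)]
          simp only [decide_eq_decide]
          push_cast
          omega
      · rw [if_neg hp]
        have hcnt : List.countP predLine (List.takeWhile (fun x => x != '\n') (c :: rest) ::
            nlSplit r) = List.countP predLine (nlSplit r) := by
          simp only [List.countP_cons, hpl]
          simp [hp]
        rw [hcnt, pvScan_eq r count]
termination_by cs.length
decreasing_by
  all_goals exact hlen

-- ===== VERDICT (by name: the statement is the Claim_ definition above) =====
theorem is_multi_stage_dockerfile_spec : Claim_equal_is_multi_stage_dockerfile := by
  intro s _hd
  unfold Spec_is_multi_stage_dockerfile is_multi_stage_dockerfile is_multi_stage_dockerfile_alt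
  rw [pvSplitOn_nl, pvScan_eq]
  have hbody : (fun (from_count : Int) line =>
      let stripped := PySem.Chars.strip line
      if !stripped.isEmpty && !(PySem.Chars.startswith stripped ['#']) then
        if PySem.Chars.startswith (PySem.Chars.upper stripped) ['F', 'R', 'O', 'M'] then
          from_count + 1
        else from_count
      else from_count) = (fun (from_count : Int) line =>
        if condA line then from_count + 1 else from_count) := by
    funext fc line
    simp only [condA, Bool.and_assoc]
    by_cases h1 : (!(PySem.Chars.strip line).isEmpty &&
        !(PySem.Chars.startswith (PySem.Chars.strip line) ['#'])) = true <;>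
      by_cases h2 : PySem.Chars.startswith (PySem.Chars.upper (PySem.Chars.strip line))
        ['F', 'R', 'O', 'M'] = true <;>
      simp [h1, h2]
  rw [hbody]
  simp only [PySem.List.foldl_count_if]
  rw [List.countP_congr (fun x _ => by rw [pvCondA_eq x])]
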